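-- pv_equiv track=rewrite | github.com/EthanTon/Curve_Generation_Tool | src/main/util/pantographUtil.py | _get_elevation
-- ===== SOURCE A (Python) =====
-- def _get_elevation(pt, elevation_map, default=0):
--     if not pt:
--         return default
--     if pt in elevation_map:
--         return elevation_map[pt]
--     for r in range(1, 20):
--         for dx in range(-r, r + 1):
--             for dz in range(-r, r + 1):
--                 if abs(dx) != r and abs(dz) != r:
--                     continue
--                 neighbour = (pt[0] + dx, pt[1] + dz)
--                 if neighbour in elevation_map:
--                     return elevation_map[neighbour]
--     return default
-- ===== SOURCE B (Python) =====
-- def _get_elevation(pt, elevation_map, default=0):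
--     # Single pass over the map: pick the entry minimizing (chebyshev distance, dx, dz)
--     # lexicographically among keys within distance < 20; default if none.
--     if not pt:
--         return default
--     best = None  # (triple, value)
--     for key, val in elevation_map.items():
--         dx = key[0] - pt[0]
--         dz = key[1] - pt[1]
--         d = max(abs(dx), abs(dz))
--         if d < 20 and (best is None or (d, dx, dz) < best[0]):
--             best = ((d, dx, dz), val)
--     return default if best is None else best[1]
-- ===== Notes on version B (the rewrite author's own statement) =====
-- stated objective: alternative
-- what changed: Replaces A's outward grid scan over 19 square rings (up to ~1520 dict membership probes) with a single pass over the map's entries that tracks the entry minimizing the tuple (chebyshev distance, dx, dz) lexicographically among keys within distance < 20, reproducing A's ring order and tie-breaking.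
import Mathlib
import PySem

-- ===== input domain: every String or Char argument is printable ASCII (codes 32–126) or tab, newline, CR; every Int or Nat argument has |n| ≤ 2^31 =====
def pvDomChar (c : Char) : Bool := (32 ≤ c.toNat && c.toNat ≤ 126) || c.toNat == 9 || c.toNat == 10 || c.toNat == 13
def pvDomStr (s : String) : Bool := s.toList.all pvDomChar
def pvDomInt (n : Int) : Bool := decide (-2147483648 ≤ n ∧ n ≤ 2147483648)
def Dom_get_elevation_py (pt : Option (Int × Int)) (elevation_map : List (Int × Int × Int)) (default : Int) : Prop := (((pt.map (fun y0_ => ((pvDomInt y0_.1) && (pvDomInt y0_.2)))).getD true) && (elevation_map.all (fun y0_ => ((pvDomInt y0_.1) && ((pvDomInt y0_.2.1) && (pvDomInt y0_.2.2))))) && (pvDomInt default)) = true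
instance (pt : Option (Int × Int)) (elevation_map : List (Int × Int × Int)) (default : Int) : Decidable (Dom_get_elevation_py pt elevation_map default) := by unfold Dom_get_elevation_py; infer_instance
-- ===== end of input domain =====

-- B replaces A's grid scan of 19 square rings with a single pass over the map's
-- entries minimizing (chebyshev distance, dx, dz) lexicographically (alternative
-- decomposition; not claimed faster).

-- ===== PORT A =====
-- dict membership + lookup: first entry whose key (e.1, e.2.1) matches
def pvLookup (m : List (Int × Int × Int)) (q : Int × Int) : Option Int :=
  match m with
  | [] => none
  | (a, b, v) :: rest => if a = q.1 ∧ b = q.2 then some v else pvLookup rest q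

def get_elevation_py (pt : Option (Int × Int)) (elevation_map : List (Int × Int × Int)) (default : Int) : Int :=
  match pt with
  | none => default
  | some p =>
    match pvLookup elevation_map p with
    | some v => v
    | none =>
      -- the triple loop with early return, rendered as findSome?
      ((PySem.List.pyRange 1 20 1).findSome? (fun r =>
        (PySem.List.pyRange (-r) (r + 1) 1).findSome? (fun dx =>
          (PySem.List.pyRange (-r) (r + 1) 1).findSome? (fun dz =>
            if |dx| ≠ r ∧ |dz| ≠ r then none
            else pvLookup elevation_map (p.1 + dx, p.2 + dz))))).getD default

-- ===== PORT B =====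
def pvTripLt (a b : Int × Int × Int) : Bool :=
  decide (a.1 < b.1) || (decide (a.1 = b.1) && (decide (a.2.1 < b.2.1) || (decide (a.2.1 = b.2.1) && decide (a.2.2 < b.2.2))))

def pvStep (p : Int × Int) (best : Option ((Int × Int × Int) × Int)) (e : Int × Int × Int) : Option ((Int × Int × Int) × Int) :=
  let dx := e.1 - p.1
  let dz := e.2.1 - p.2
  let d := max |dx| |dz|
  let better := match best with
    | none => true
    | some (t0, _) => pvTripLt (d, dx, dz) t0
  if d < 20 ∧ better = true then some ((d, dx, dz), e.2.2) else best

def get_elevation_py_alt (pt : Option (Int × Int)) (elevation_map : List (Int × Int × Int)) (default : Int) : Int :=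
  match pt with
  | none => default
  | some p =>
    match elevation_map.foldl (pvStep p) none with
    | none => default
    | some (_, v) => v

-- ===== PRECONDITION & SPEC =====
def Spec_get_elevation_py (pt : Option (Int × Int)) (elevation_map : List (Int × Int × Int)) (default : Int) (out : Int) : Prop := out = get_elevation_py_alt pt elevation_map default
instance (pt : Option (Int × Int)) (elevation_map : List (Int × Int × Int)) (default : Int) (out : Int) : Decidable (Spec_get_elevation_py pt elevation_map default out) := by unfold Spec_get_elevation_py; infer_instance

-- ===== CLAIM (what is proved, stated in full; the proofs are below) =====
def Claim_equal_get_elevation_py : Prop := ∀ (pt : Option (Int × Int)) (elevation_map : List (Int × Int × Int)) (default : Int), Dom_get_elevation_py pt elevation_map default → Spec_get_elevation_py pt elevation_map default (get_elevation_py pt elevation_map default)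

-- ===== LEMMAS AND PROOFS =====

-- the lex triple of an offset
def pvT (o : Int × Int) : Int × Int × Int := (max |o.1| |o.2|, o.1, o.2)
-- the lex triple of a map entry relative to p
def pvTrip (p : Int × Int) (e : Int × Int × Int) : Int × Int × Int :=
  (max |e.1 - p.1| |e.2.1 - p.2|, e.1 - p.1, e.2.1 - p.2)

-- ring r of the grid scan, as the list of offsets it visits, in visit order
def pvRing (r : Int) : List (Int × Int) :=
  (PySem.List.pyRange (-r) (r + 1) 1).flatMap (fun dx =>
    ((PySem.List.pyRange (-r) (r + 1) 1).filter (fun dz => !decide (|dx| ≠ r ∧ |dz| ≠ r))).map (fun dz => (dx, dz)))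

def pvM : List (Int × Int) := (PySem.List.pyRange 1 20 1).flatMap pvRing

lemma pvTripLt_irrefl (a : Int × Int × Int) : pvTripLt a a = false := by
  simp [pvTripLt]

lemma pvTripLt_asymm {a b : Int × Int × Int} (h : pvTripLt a b = true) : pvTripLt b a = false := by
  simp [pvTripLt] at *; omega

lemma pvTripLt_total {a b : Int × Int × Int} (h : a ≠ b) :
    pvTripLt a b = true ∨ pvTripLt b a = true := by
  rcases a with ⟨a1, a2, a3⟩; rcases b with ⟨b1, b2, b3⟩
  simp [pvTripLt, Prod.ext_iff] at *; omega

lemma pvTrip_eq_T (p : Int × Int) (e : Int × Int × Int) :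
    pvTrip p e = pvT (e.1 - p.1, e.2.1 - p.2) := rfl

lemma pvStep_none (p : Int × Int) (e : Int × Int × Int) :
    pvStep p none e = if (pvTrip p e).1 < 20 then some (pvTrip p e, e.2.2) else none := by
  simp [pvStep, pvTrip]

lemma pvStep_some (p : Int × Int) (e : Int × Int × Int) (t0 : Int × Int × Int) (v0 : Int) :
    pvStep p (some (t0, v0)) e =
      if (pvTrip p e).1 < 20 ∧ pvTripLt (pvTrip p e) t0 = true
      then some (pvTrip p e, e.2.2) else some (t0, v0) := by
  simp [pvStep, pvTrip]

lemma findSome?_ite_not {α β : Type} (P : α → Prop) [DecidablePred P] (g : α → Option β) (l : List α) :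
    (l.findSome? fun x => if P x then none else g x) =
      (l.filter (fun x => !decide (P x))).findSome? g := by
  induction l with
  | nil => simp
  | cons a l ih =>
    by_cases h : P a <;> simp [List.findSome?_cons, h, ih]

lemma findSome?_flatMap {α β γ : Type} (l : List α) (g : α → List β) (f : β → Option γ) :
    (l.flatMap g).findSome? f = l.findSome? (fun x => (g x).findSome? f) := by
  induction l with
  | nil => simp
  | cons a l ih =>
    rw [List.flatMap_cons, List.findSome?_append, ih, List.findSome?_cons]
    cases (g a).findSome? f <;> simp

-- no entry within distance 20: the fold leaves the accumulator unchanged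
lemma pvFoldl_skip (p : Int × Int) (m : List (Int × Int × Int))
    (acc : Option ((Int × Int × Int) × Int))
    (h : ∀ e ∈ m, ¬ (pvTrip p e).1 < 20) :
    m.foldl (pvStep p) acc = acc := by
  induction m generalizing acc with
  | nil => rfl
  | cons e m ih =>
    have he := h e (by simp)
    rw [List.foldl_cons]
    have hstep : pvStep p acc e = acc := by
      rcases acc with _ | ⟨t0, v0⟩
      · rw [pvStep_none, if_neg he]
      · rw [pvStep_some, if_neg (fun hc => he hc.1)]
    rw [hstep]
    exact ih _ (fun e' he' => h e' (by simp [he']))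

-- accumulator already holds a minimal triple: the fold keeps it
lemma pvFoldl_stay (p : Int × Int) (m : List (Int × Int × Int)) (t : Int × Int × Int) (v : Int)
    (h : ∀ e ∈ m, (pvTrip p e).1 < 20 → pvTripLt (pvTrip p e) t = false) :
    m.foldl (pvStep p) (some (t, v)) = some (t, v) := by
  induction m with
  | nil => rfl
  | cons e m ih =>
    have he := h e (by simp)
    rw [List.foldl_cons, pvStep_some]
    rw [if_neg (by rintro ⟨h1, h2⟩; rw [he h1] at h2; simp at h2)]
    exact ih (fun e' he' => h e' (by simp [he']))

lemma pvLookup_none {m : List (Int × Int × Int)} {q : Int × Int}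
    (h : pvLookup m q = none) : ∀ e ∈ m, ¬ (e.1 = q.1 ∧ e.2.1 = q.2) := by
  induction m with
  | nil => simp
  | cons e m ih =>
    rcases e with ⟨a, b, v⟩
    rw [pvLookup] at h
    by_cases hk : a = q.1 ∧ b = q.2
    · rw [if_pos hk] at h; exact absurd h (by simp)
    · rw [if_neg hk] at h
      rintro e' he' hkey
      rcases List.mem_cons.mp he' with rfl | hmem
      · exact hk hkey
      · exact ih h e' hmem hkey

-- the key q is present and its triple is minimal: the fold ends on q's first entry
lemma pvFoldl_min (p : Int × Int) :
    ∀ (m : List (Int × Int × Int)) (acc : Option ((Int × Int × Int) × Int))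
      (q : Int × Int) (v : Int),
      pvLookup m q = some v →
      (pvT (q.1 - p.1, q.2 - p.2)).1 < 20 →
      (∀ e ∈ m, (pvTrip p e).1 < 20 → pvTripLt (pvTrip p e) (pvT (q.1 - p.1, q.2 - p.2)) = false) →
      (acc = none ∨ ∃ t0 v0, acc = some (t0, v0) ∧ pvTripLt (pvT (q.1 - p.1, q.2 - p.2)) t0 = true) →
      m.foldl (pvStep p) acc = some (pvT (q.1 - p.1, q.2 - p.2), v) := by
  intro m
  induction m with
  | nil => intro acc q v h; simp [pvLookup] at h
  | cons e m ih =>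
    intro acc q v hlk hlt hmin hacc
    rcases e with ⟨a, b, w⟩
    rw [pvLookup] at hlk
    by_cases hk : a = q.1 ∧ b = q.2
    · rw [if_pos hk] at hlk
      have hv : w = v := by injection hlk
      subst hv
      have htrip : pvTrip p (a, b, w) = pvT (q.1 - p.1, q.2 - p.2) := by
        simp [pvTrip, pvT, hk.1, hk.2]
      rw [List.foldl_cons]
      have hstay := pvFoldl_stay p m (pvT (q.1 - p.1, q.2 - p.2)) w
        (fun e' he' => hmin e' (by simp [he']))
      rcases hacc with rfl | ⟨t0, v0, rfl, hlt0⟩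
      · rw [pvStep_none, if_pos (by rw [htrip]; exact hlt), htrip]
        exact hstay
      · rw [pvStep_some, if_pos ⟨by rw [htrip]; exact hlt, by rw [htrip]; exact hlt0⟩, htrip]
        exact hstay
    · rw [if_neg hk] at hlk
      have hne : pvTrip p (a, b, w) ≠ pvT (q.1 - p.1, q.2 - p.2) := by
        intro hEq
        apply hk
        have h2 := congrArg (fun t => t.2.1) hEq
        have h3 := congrArg (fun t => t.2.2) hEq
        simp [pvTrip, pvT] at h2 h3
        constructor <;> omega
      have hminT : (pvTrip p (a, b, w)).1 < 20 →
          pvTripLt (pvT (q.1 - p.1, q.2 - p.2)) (pvTrip p (a, b, w)) = true := by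
        intro hd
        have h1 : pvTripLt (pvTrip p (a, b, w)) (pvT (q.1 - p.1, q.2 - p.2)) = false :=
          hmin (a, b, w) (by simp) hd
        rcases pvTripLt_total hne with h | h
        · rw [h1] at h; exact absurd h (by simp)
        · exact h
      have hmin' := fun e' he' => hmin e' (List.mem_cons_of_mem _ he')
      rw [List.foldl_cons]
      rcases hacc with rfl | ⟨t0, v0, rfl, hlt0⟩
      · rw [pvStep_none]
        by_cases hd : (pvTrip p (a, b, w)).1 < 20
        · rw [if_pos hd]
          exact ih _ q v hlk hlt hmin' (Or.inr ⟨_, _, rfl, hminT hd⟩)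
        · rw [if_neg hd]
          exact ih _ q v hlk hlt hmin' (Or.inl rfl)
      · rw [pvStep_some]
        by_cases hc : (pvTrip p (a, b, w)).1 < 20 ∧ pvTripLt (pvTrip p (a, b, w)) t0 = true
        · rw [if_pos hc]
          exact ih _ q v hlk hlt hmin' (Or.inr ⟨_, _, rfl, hminT hc.1⟩)
        · rw [if_neg hc]
          exact ih _ q v hlk hlt hmin' (Or.inr ⟨_, _, rfl, hlt0⟩)

-- the bridge: a strictly triple-sorted, complete offset list scanned by findSome?
-- finds exactly what the single-pass minimum fold finds
lemma pvBridge (p : Int × Int) :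
    ∀ (L : List (Int × Int)) (m : List (Int × Int × Int)),
      L.Pairwise (fun o1 o2 => pvTripLt (pvT o1) (pvT o2) = true) →
      (∀ o ∈ L, (pvT o).1 < 20) →
      (∀ e ∈ m, (pvTrip p e).1 < 20 → (e.1 - p.1, e.2.1 - p.2) ∈ L) →
      L.findSome? (fun o => pvLookup m (p.1 + o.1, p.2 + o.2)) =
        (m.foldl (pvStep p) none).map (·.2) := by
  intro L
  induction L with
  | nil =>
    intro m _ _ hcomp
    rw [pvFoldl_skip p m none (fun e he hd => absurd (hcomp e he hd) (by simp))]
    rfl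
  | cons o L ih =>
    intro m hpw hbd hcomp
    rw [List.findSome?_cons]
    cases hlk : pvLookup m (p.1 + o.1, p.2 + o.2) with
    | none =>
      have hnone := pvLookup_none hlk
      have hcomp' : ∀ e ∈ m, (pvTrip p e).1 < 20 → (e.1 - p.1, e.2.1 - p.2) ∈ L := by
        intro e he hd
        rcases List.mem_cons.mp (hcomp e he hd) with hEq | hmem
        · exfalso
          apply hnone e he
          have h1 := congrArg Prod.fst hEq
          have h2 := congrArg Prod.snd hEq
          simp at h1 h2
          constructor <;> omega
        · exact hmem
      exact ih m (List.Pairwise.sublist (List.sublist_cons_self o L) hpw)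
        (fun o' ho' => hbd o' (by simp [ho'])) hcomp'
    | some v =>
      have hTo : pvT ((p.1 + o.1) - p.1, (p.2 + o.2) - p.2) = pvT o := by
        simp [pvT]
      have hmin : ∀ e ∈ m, (pvTrip p e).1 < 20 →
          pvTripLt (pvTrip p e) (pvT ((p.1 + o.1) - p.1, (p.2 + o.2) - p.2)) = false := by
        intro e he hd
        rw [hTo]
        rcases List.mem_cons.mp (hcomp e he hd) with hEq | hmem
        · rw [pvTrip_eq_T, hEq]; exact pvTripLt_irrefl _
        · rw [pvTrip_eq_T]
          exact pvTripLt_asymm (List.rel_of_pairwise_cons hpw hmem)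
      have hfold := pvFoldl_min p m none (p.1 + o.1, p.2 + o.2) v hlk
        (by rw [hTo]; exact hbd o (by simp)) hmin (Or.inl rfl)
      rw [hfold, hTo]
      rfl

-- an offset visited by ring r has chebyshev distance exactly r
lemma pv_ring_d {r dx dz : Int}
    (hdx : dx ∈ PySem.List.pyRange (-r) (r + 1) 1)
    (hdz : dz ∈ (PySem.List.pyRange (-r) (r + 1) 1).filter (fun z => !decide (|dx| ≠ r ∧ |z| ≠ r))) :
    max |dx| |dz| = r := by
  have hbx := PySem.List.mem_pyRange_one.mp hdx
  have hbz := PySem.List.mem_pyRange_one.mp (List.mem_filter.mp hdz).1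
  have hcond : |dx| = r ∨ |dz| = r := by simpa using (List.mem_filter.mp hdz).2
  rcases hcond with h | h <;> simp only [Int.abs_eq_natAbs] at * <;> omega

-- membership in ring r is exactly chebyshev distance r
lemma pv_mem_pvRing {r : Int} (hr : 1 ≤ r) (o : Int × Int) :
    o ∈ pvRing r ↔ max |o.1| |o.2| = r := by
  rcases o with ⟨dx, dz⟩
  constructor
  · intro h
    rw [pvRing] at h
    obtain ⟨a, ha, hmap⟩ := List.mem_flatMap.mp h
    obtain ⟨b, hb, heq⟩ := List.mem_map.mp hmap
    obtain ⟨rfl, rfl⟩ : a = dx ∧ b = dz :=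
      ⟨congrArg Prod.fst heq, congrArg Prod.snd heq⟩
    exact pv_ring_d ha hb
  · intro h
    rw [pvRing]
    refine List.mem_flatMap.mpr ⟨dx, PySem.List.mem_pyRange_one.mpr ?_,
      List.mem_map.mpr ⟨dz, List.mem_filter.mpr ⟨PySem.List.mem_pyRange_one.mpr ?_, ?_⟩, rfl⟩⟩
    · simp only [Int.abs_eq_natAbs] at *; omega
    · simp only [Int.abs_eq_natAbs] at *; omega
    · simp only [Bool.not_eq_eq_eq_not, Bool.not_true, decide_eq_false_iff_not, not_and, not_not]
      intro hax
      simp only [Int.abs_eq_natAbs] at *; omega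

lemma pv_mem_pvM_iff (o : Int × Int) :
    o ∈ pvM ↔ (1 ≤ max |o.1| |o.2| ∧ max |o.1| |o.2| < 20) := by
  simp only [pvM, List.mem_flatMap, PySem.List.mem_pyRange_one]
  constructor
  · rintro ⟨r, ⟨hr1, hr2⟩, hm⟩
    rw [pv_mem_pvRing hr1] at hm
    omega
  · rintro ⟨h1, h2⟩
    exact ⟨max |o.1| |o.2|, ⟨h1, h2⟩, (pv_mem_pvRing h1 o).mpr rfl⟩

-- completeness: every offset within distance 20 is scanned
lemma pv_complete (o : Int × Int) (h : max |o.1| |o.2| < 20) :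
    o ∈ (((0 : Int), (0 : Int)) :: pvM) := by
  rcases o with ⟨dx, dz⟩
  by_cases h0 : dx = 0 ∧ dz = 0
  · simp [h0.1, h0.2]
  · right
    refine (pv_mem_pvM_iff (dx, dz)).mpr ?_
    simp only [Int.abs_eq_natAbs] at *
    constructor <;> omega

lemma pv_bound : ∀ o ∈ (((0 : Int), (0 : Int)) :: pvM), (pvT o).1 < 20 := by
  intro o ho
  rcases List.mem_cons.mp ho with rfl | hm
  · simp [pvT]
  · exact ((pv_mem_pvM_iff o).mp hm).2

-- the scan order is strictly increasing in the lex triple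
lemma pv_pairwise :
    (((0 : Int), (0 : Int)) :: pvM).Pairwise (fun o1 o2 => pvTripLt (pvT o1) (pvT o2) = true) := by
  rw [List.pairwise_cons]
  constructor
  · intro o hm
    have h1 := ((pv_mem_pvM_iff o).mp hm).1
    simp only [pvT, pvTripLt]
    simp only [abs_zero, max_self]
    have : (0 : Int) < max |o.1| |o.2| := by omega
    simp [this]
  · rw [pvM, List.pairwise_flatMap]
    constructor
    · -- within each ring
      intro r hr
      rw [pvRing, List.pairwise_flatMap]
      refine ⟨?_, ?_⟩
      · -- within one dx-column
        intro dx hdx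
        rw [List.pairwise_map]
        have hpw := List.Pairwise.filter (fun z => !decide (|dx| ≠ r ∧ |z| ≠ r))
          (PySem.List.pairwise_lt_pyRange_one (a := -r) (b := r + 1))
        refine hpw.imp_of_mem ?_
        intro dz1 dz2 h1 h2 hlt
        have hd1 : max |dx| |dz1| = r := pv_ring_d hdx h1
        have hd2 : max |dx| |dz2| = r := pv_ring_d hdx h2
        simp only [pvT, pvTripLt, hd1, hd2]
        simp [hlt]
      · -- across dx-columns
        have hpw := PySem.List.pairwise_lt_pyRange_one (a := -r) (b := r + 1)
        refine hpw.imp_of_mem ?_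
        intro dx1 dx2 hdx1 hdx2 hlt o1 ho1 o2 ho2
        obtain ⟨dz1, hdz1, rfl⟩ := List.mem_map.mp ho1
        obtain ⟨dz2, hdz2, rfl⟩ := List.mem_map.mp ho2
        have hd1 : max |dx1| |dz1| = r := pv_ring_d hdx1 hdz1
        have hd2 : max |dx2| |dz2| = r := pv_ring_d hdx2 hdz2
        simp only [pvT, pvTripLt, hd1, hd2]
        simp [hlt]
    · -- across rings
      have hpw := PySem.List.pairwise_lt_pyRange_one (a := 1) (b := 20)
      refine hpw.imp_of_mem ?_
      intro r1 r2 hr1 hr2 hlt o1 ho1 o2 ho2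
      have g1 : 1 ≤ r1 := (PySem.List.mem_pyRange_one.mp hr1).1
      have g2 : 1 ≤ r2 := (PySem.List.mem_pyRange_one.mp hr2).1
      have d1 := (pv_mem_pvRing g1 o1).mp ho1
      have d2 := (pv_mem_pvRing g2 o2).mp ho2
      simp only [pvT, pvTripLt, d1, d2]
      simp [hlt]

-- A rewritten as a findSome? over the explicit scan-order offset list
lemma pvA_eq (p : Int × Int) (m : List (Int × Int × Int)) (default : Int) :
    get_elevation_py (some p) m default =
      (((((0 : Int), (0 : Int)) :: pvM).findSome?
        (fun o => pvLookup m (p.1 + o.1, p.2 + o.2))).getD default) := by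
  rw [List.findSome?_cons]
  have h00 : pvLookup m (p.1 + ((0 : Int), (0 : Int)).1, p.2 + ((0 : Int), (0 : Int)).2) = pvLookup m p := by
    simp
  rw [h00, get_elevation_py]
  cases hlk : pvLookup m p with
  | some v => rfl
  | none =>
    have hM : pvM.findSome? (fun o => pvLookup m (p.1 + o.1, p.2 + o.2)) =
        (PySem.List.pyRange 1 20 1).findSome? (fun r =>
          (PySem.List.pyRange (-r) (r + 1) 1).findSome? (fun dx =>
            (PySem.List.pyRange (-r) (r + 1) 1).findSome? (fun dz =>
              if |dx| ≠ r ∧ |dz| ≠ r then none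
              else pvLookup m (p.1 + dx, p.2 + dz)))) := by
      rw [pvM, findSome?_flatMap]
      congr 1
      funext r
      rw [pvRing, findSome?_flatMap]
      congr 1
      funext dx
      rw [List.findSome?_map, findSome?_ite_not]
      simp only [Function.comp_def]
    rw [hM]

lemma pvAlt_eq (p : Int × Int) (m : List (Int × Int × Int)) (default : Int) :
    get_elevation_py_alt (some p) m default =
      ((m.foldl (pvStep p) none).map (·.2)).getD default := by
  rw [get_elevation_py_alt]
  cases m.foldl (pvStep p) none with
  | none => rfl
  | some tv => rcases tv with ⟨t, v⟩; rfl

-- ===== VERDICT (by name: the statement is the Claim_ definition above) =====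
theorem get_elevation_py_spec : Claim_equal_get_elevation_py := by
  intro pt m default _
  unfold Spec_get_elevation_py
  cases pt with
  | none => rfl
  | some p =>
    rw [pvA_eq, pvAlt_eq]
    rw [pvBridge p _ m pv_pairwise pv_bound
      (fun e he hd => pv_complete _ (by simpa [pvTrip] using hd))]
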